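-- pv_equiv track=rewrite | github.com/FloVerse/bataille | src/game.py | get_nb_colors
-- ===== SOURCE A (Python) =====
-- def get_nb_colors(hand):
--     """
--     hand est un ensemble de 5 cartes
--     Retourne le nombre de couleurs différentes dans la main
--     """
--     i = 0
--     j = 0
--     k = 0
--     l = 0
--     for value in range(len(hand)):
--         if hand[value][1] == "Pique":
--             if i < 1:
--                 i = i + 1
--         if hand[value][1] == "Trefle":
--             if j < 1:
--                 j = j + 1
--         if hand[value][1] == "Coeur":
--             if k < 1:
--                 k = k + 1
--         if hand[value][1] == "Carreau":
--             if l < 1: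
--                 l = l + 1
--     nc = i + j + k + l
--     return nc
-- ===== SOURCE B (Python) =====
-- SUITS = ("Pique", "Trefle", "Coeur", "Carreau")
--
--
-- def get_nb_colors(hand):
--     """
--     hand est un ensemble de 5 cartes
--     Retourne le nombre de couleurs différentes dans la main
--     """
--     return sum(any(card[1] == suit for card in hand) for suit in SUITS)
-- ===== Notes on version B (the rewrite author's own statement) =====
-- stated objective: simpler
-- what changed: Inverts the traversal: instead of one card-major pass maintaining four capped counters, B loops over the four fixed suits and for each does a membership scan of the hand (any), summing the four booleans.
import Mathlib
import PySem

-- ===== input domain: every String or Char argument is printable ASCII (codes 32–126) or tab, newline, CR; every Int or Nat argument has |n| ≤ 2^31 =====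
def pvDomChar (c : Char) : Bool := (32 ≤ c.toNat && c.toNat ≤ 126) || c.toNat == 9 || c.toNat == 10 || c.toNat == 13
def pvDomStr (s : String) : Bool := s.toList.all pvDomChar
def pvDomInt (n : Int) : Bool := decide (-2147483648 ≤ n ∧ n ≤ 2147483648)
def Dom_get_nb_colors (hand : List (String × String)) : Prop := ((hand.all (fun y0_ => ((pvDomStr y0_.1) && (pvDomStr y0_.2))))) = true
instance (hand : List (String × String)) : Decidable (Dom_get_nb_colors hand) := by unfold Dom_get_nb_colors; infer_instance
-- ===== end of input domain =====

-- B inverts the traversal: instead of A's card-major pass with four capped counters,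
-- it loops over the four fixed suits and scans the hand for membership of each,
-- summing the booleans (objective: simpler).


-- ===== PORT A =====
-- one iteration of A's loop body: the four sequential ifs on hand[value][1], each capping its counter at 1
def pvStepA (s : Int × Int × Int × Int) (card : String × String) : Int × Int × Int × Int :=
  let i := if card.2 == "Pique" then (if s.1 < 1 then s.1 + 1 else s.1) else s.1
  let j := if card.2 == "Trefle" then (if s.2.1 < 1 then s.2.1 + 1 else s.2.1) else s.2.1
  let k := if card.2 == "Coeur" then (if s.2.2.1 < 1 then s.2.2.1 + 1 else s.2.2.1) else s.2.2.1
  let l := if card.2 == "Carreau" then (if s.2.2.2 < 1 then s.2.2.2 + 1 else s.2.2.2) else s.2.2.2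
  (i, j, k, l)

def get_nb_colors (hand : List (String × String)) : Int :=
  let st := (PySem.List.pyRange 0 (PySem.List.len hand)).foldl
    (fun acc value => pvStepA acc (PySem.List.pyGetD hand value ("", ""))) (0, 0, 0, 0)
  st.1 + st.2.1 + st.2.2.1 + st.2.2.2

-- ===== PORT B =====
def pvSUITS : List String := ["Pique", "Trefle", "Coeur", "Carreau"]

-- sum(any(card[1] == suit for card in hand) for suit in SUITS)
def get_nb_colors_alt (hand : List (String × String)) : Int :=
  pvSUITS.foldl
    (fun acc suit => acc + (if hand.any (fun card => card.2 == suit) then (1 : Int) else 0)) 0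

-- ===== PRECONDITION & SPEC =====
def Spec_get_nb_colors (hand : List (String × String)) (out : Int) : Prop := out = get_nb_colors_alt hand
instance (hand : List (String × String)) (out : Int) : Decidable (Spec_get_nb_colors hand out) := by unfold Spec_get_nb_colors; infer_instance

-- ===== CLAIM (what is proved, stated in full; the proofs are below) =====
def Claim_equal_get_nb_colors : Prop := ∀ (hand : List (String × String)), Dom_get_nb_colors hand → Spec_get_nb_colors hand (get_nb_colors hand)

-- ===== LEMMAS AND PROOFS =====

-- one component of A's loop state, seen in isolation
def pvBump (t : String) (c : Int) (card : String × String) : Int :=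
  if card.2 == t then (if c < 1 then c + 1 else c) else c

-- A's tuple fold is the tuple of the four independent component folds
theorem pvStepA_factor (l : List (String × String)) (a b c d : Int) :
    l.foldl pvStepA (a, b, c, d) =
      (l.foldl (pvBump "Pique") a, l.foldl (pvBump "Trefle") b,
       l.foldl (pvBump "Coeur") c, l.foldl (pvBump "Carreau") d) := by
  induction l generalizing a b c d with
  | nil => rfl
  | cons x l ih => simp [List.foldl, pvStepA, pvBump, ih]

-- a capped flag counter computes the "some card has this suit" indicator
theorem pvBump_fold (t : String) (l : List (String × String)) (c : Int) (hc : c = 0 ∨ c = 1) :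
    l.foldl (pvBump t) c = if (l.any (fun card => card.2 == t) ∨ c = 1) then 1 else 0 := by
  induction l generalizing c with
  | nil => rcases hc with h | h <;> simp [h]
  | cons x l ih =>
    by_cases hx : x.2 = t
    · have hstep : pvBump t c x = 1 := by
        rcases hc with h | h <;> simp [pvBump, hx, h]
      rw [List.foldl_cons, hstep, ih 1 (Or.inr rfl)]
      simp [hx]
    · have hstep : pvBump t c x = c := by simp [pvBump, hx]
      rw [List.foldl_cons, hstep, ih c hc]
      have hxf : (x.2 == t) = false := by simp [hx]
      simp only [List.any_cons, hxf, Bool.false_or]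

-- ===== VERDICT (by name: the statement is the Claim_ definition above) =====
theorem get_nb_colors_spec : Claim_equal_get_nb_colors := by
  intro hand _
  unfold Spec_get_nb_colors get_nb_colors get_nb_colors_alt
  rw [PySem.List.foldl_pyRange_pyGetD hand ("", "") pvStepA (0, 0, 0, 0) le_rfl]
  simp only [Int.toNat_zero, List.drop_zero]
  rw [pvStepA_factor]
  rw [pvBump_fold _ _ _ (Or.inl rfl), pvBump_fold _ _ _ (Or.inl rfl),
      pvBump_fold _ _ _ (Or.inl rfl), pvBump_fold _ _ _ (Or.inl rfl)]
  have h01 : ((0 : Int) = 1) = False := by simp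
  simp only [pvSUITS, List.foldl_cons, List.foldl_nil, h01, or_false]
  ring
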